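-- pv_equiv track=rewrite | github.com/KunalSharma7666/RSA-Powered-Connection-System | pkda.py | RSA_Decode
-- ===== SOURCE A (Python) =====
-- def RSA_Decode(tup):
--     msg = ""
--     char_map = {value: chr(value + ord("a")) for value in range(26)}
--     char_map.update({value: chr(value - 26 + ord("0")) for value in range(26, 36)})  # Mapping ASCII values to characters
--
--     index = 0
--     while index < len(tup):
--         char = tup[index]
--         if char in char_map:
--             msg += char_map[char]
--         index += 1
--     return msg
-- ===== SOURCE B (Python) =====
-- TABLE = "abcdefghijklmnopqrstuvwxyz0123456789"
--
--
-- def RSA_Decode(tup):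
--     # Divide-and-conquer: decode each half of the index range and concatenate,
--     # looking characters up in a constant table string instead of a dict.
--     def go(lo, hi):
--         if lo >= hi:
--             return ""
--         if hi - lo == 1:
--             c = tup[lo]
--             return TABLE[c] if 0 <= c < 36 else ""
--         mid = (lo + hi) // 2
--         return go(lo, mid) + go(mid, hi)
--
--     return go(0, len(tup))
-- ===== Notes on version B (the rewrite author's own statement) =====
-- stated objective: alternative
-- what changed: Replaces A's 36-entry dict and sequential index-driven while loop with a divide-and-conquer recursion over index ranges that concatenates the decodings of the two halves, looking each character up in a constant table string.
import Mathlib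
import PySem

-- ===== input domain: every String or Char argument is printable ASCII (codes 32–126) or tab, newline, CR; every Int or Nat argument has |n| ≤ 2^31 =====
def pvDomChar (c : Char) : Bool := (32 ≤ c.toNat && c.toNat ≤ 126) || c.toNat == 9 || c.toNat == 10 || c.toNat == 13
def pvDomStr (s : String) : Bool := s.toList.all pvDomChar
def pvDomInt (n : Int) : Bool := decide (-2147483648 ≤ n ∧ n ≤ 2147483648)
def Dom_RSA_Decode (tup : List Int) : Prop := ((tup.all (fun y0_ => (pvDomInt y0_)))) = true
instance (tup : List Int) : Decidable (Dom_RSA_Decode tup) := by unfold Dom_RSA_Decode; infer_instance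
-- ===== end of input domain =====

-- B replaces A's dict table + sequential while loop with a divide-and-conquer
-- recursion over index ranges using a constant table string (objective: alternative).


-- ===== PORT A =====
-- char_map = {v: chr(v + ord('a')) for v in range(26)}; char_map.update({v: chr(v - 26 + ord('0')) for v in range(26, 36)})
-- chr is exact here: every code built is an ASCII code (48..122), so Char.ofNat (·.toNat) is chr.
def pvCharMapA : PySem.Dict Int String :=
  let d :=
    (PySem.List.pyRange 0 26 1).foldl
      (fun d v => d.insert v (String.mk [Char.ofNat (v + 97).toNat])) PySem.Dict.empty
  (PySem.List.pyRange 26 36 1).foldl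
    (fun d v => d.insert v (String.mk [Char.ofNat (v - 26 + 48).toNat])) d

-- the while loop: cursor over tup, accumulator msg; 'if char in char_map: msg += char_map[char]'
def pvLoopA (cm : PySem.Dict Int String) : List Int → String → String
  | [], msg => msg
  | c :: rest, msg =>
      pvLoopA cm rest (match cm.get? c with
        | some s => msg ++ s
        | none => msg)

def RSA_Decode (tup : List Int) : String :=
  pvLoopA pvCharMapA tup ""

-- ===== PORT B =====
-- TABLE = "abcdefghijklmnopqrstuvwxyz0123456789"
def pvTable : String := "abcdefghijklmnopqrstuvwxyz0123456789"

-- go(lo, hi): if lo >= hi: ""  elif hi-lo == 1: TABLE[tup[lo]] if 0 <= tup[lo] < 36 else ""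
-- else go(lo, mid) + go(mid, hi) with mid = (lo+hi)//2.
-- (the 'none' arms are unreachable: go is only called with 0 ≤ lo < hi ≤ len(tup) and 0 ≤ c < 36)
def pvGoB (tup : List Int) (lo hi : Int) : String :=
  if lo ≥ hi then ""
  else if hi - lo = 1 then
    match PySem.List.pyGet? tup lo with
    | some c =>
        if 0 ≤ c ∧ c < 36 then
          match PySem.Str.pyGet? pvTable c with
          | some ch => String.mk [ch]
          | none => ""
        else ""
    | none => ""
  else
    let mid := PySem.Int.floordiv (lo + hi) 2
    pvGoB tup lo mid ++ pvGoB tup mid hi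
termination_by (hi - lo).toNat
decreasing_by
  all_goals simp only [PySem.Int.floordiv_eq_ediv_of_pos (show (0:Int) < 2 by omega)]
  all_goals omega

def RSA_Decode_alt (tup : List Int) : String :=
  pvGoB tup 0 (tup.length : Int)

-- ===== PRECONDITION & SPEC =====
def Spec_RSA_Decode (tup : List Int) (out : String) : Prop := out = RSA_Decode_alt tup
instance (tup : List Int) (out : String) : Decidable (Spec_RSA_Decode tup out) := by unfold Spec_RSA_Decode; infer_instance

-- ===== CLAIM =====
def Claim_equal_RSA_Decode : Prop := ∀ (tup : List Int), Dom_RSA_Decode tup → Spec_RSA_Decode tup (RSA_Decode tup)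

-- ===== LEMMAS AND PROOFS =====

-- the common character semantics: what both programs emit for a single code c
def pvChr (c : Int) : String :=
  if 0 ≤ c ∧ c < 36 then
    if c < 26 then String.mk [Char.ofNat (c + 97).toNat]
    else String.mk [Char.ofNat (c + 22).toNat]
  else ""

def pvDecode (l : List Int) : String := String.join (l.map pvChr)

set_option maxHeartbeats 2000000 in
theorem pvCharMapA_eq : pvCharMapA = PySem.Dict.mk
    [(0, "a"), (1, "b"), (2, "c"), (3, "d"), (4, "e"), (5, "f"), (6, "g"), (7, "h"),
     (8, "i"), (9, "j"), (10, "k"), (11, "l"), (12, "m"), (13, "n"), (14, "o"), (15, "p"),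
     (16, "q"), (17, "r"), (18, "s"), (19, "t"), (20, "u"), (21, "v"), (22, "w"), (23, "x"),
     (24, "y"), (25, "z"), (26, "0"), (27, "1"), (28, "2"), (29, "3"), (30, "4"), (31, "5"),
     (32, "6"), (33, "7"), (34, "8"), (35, "9")] := by decide

set_option maxHeartbeats 2000000 in
theorem get?_pvCharMapA (c : Int) :
    pvCharMapA.get? c = if 0 ≤ c ∧ c < 36 then some (pvChr c) else none := by
  by_cases h : 0 ≤ c ∧ c < 36
  · rw [if_pos h, pvCharMapA_eq]
    obtain ⟨n, hn, rfl⟩ : ∃ n : Nat, n < 36 ∧ c = (n : Int) :=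
      ⟨c.toNat, by omega, by omega⟩
    interval_cases n <;> decide
  · rw [if_neg h, pvCharMapA_eq]
    rw [PySem.Dict.get?_eq_none_iff_not_mem_keys]
    simp only [PySem.Dict.keys_mk, List.map_cons, List.map_nil, List.mem_cons,
      List.not_mem_nil, or_false]
    omega

set_option maxHeartbeats 2000000 in
theorem table_pyGet? (c : Int) (h : 0 ≤ c ∧ c < 36) :
    (match PySem.Str.pyGet? pvTable c with
      | some ch => String.mk [ch]
      | none => "") = pvChr c := by
  obtain ⟨n, hn, rfl⟩ : ∃ n : Nat, n < 36 ∧ c = (n : Int) :=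
    ⟨c.toNat, by omega, by omega⟩
  interval_cases n <;> decide

theorem join_foldl (l : List String) (s : String) :
    List.foldl (· ++ ·) s l = s ++ String.join l := by
  induction l generalizing s with
  | nil => simp [String.join]
  | cons a l ih =>
      simp only [String.join, List.foldl_cons]
      rw [ih (s ++ a), ih ("" ++ a)]
      simp [String.append_assoc]

theorem join_cons (a : String) (l : List String) :
    String.join (a :: l) = a ++ String.join l := by
  show List.foldl (· ++ ·) ("" ++ a) l = a ++ String.join l
  simp [join_foldl]

theorem pvDecode_append (l1 l2 : List Int) :
    pvDecode (l1 ++ l2) = pvDecode l1 ++ pvDecode l2 := by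
  induction l1 with
  | nil => simp [pvDecode, String.join]
  | cons a l ih =>
      simp only [pvDecode, List.cons_append, List.map_cons, join_cons] at *
      rw [ih, String.append_assoc]

theorem pvLoopA_spec (tup : List Int) (msg : String) :
    pvLoopA pvCharMapA tup msg = msg ++ pvDecode tup := by
  induction tup generalizing msg with
  | nil => simp [pvLoopA, pvDecode, String.join]
  | cons c rest ih =>
      unfold pvLoopA
      rw [get?_pvCharMapA]
      by_cases h : 0 ≤ c ∧ c < 36
      · rw [if_pos h]
        simp only [pvDecode, List.map_cons, join_cons] at *
        rw [ih, String.append_assoc]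
      · rw [if_neg h]
        simp only [pvDecode, List.map_cons, join_cons] at *
        rw [ih, pvChr, if_neg h]
        simp

theorem take_drop_split {α : Type} (l : List α) (a b c : Nat) (h1 : a ≤ b) (h2 : b ≤ c) :
    (l.drop a).take (c - a) = (l.drop a).take (b - a) ++ (l.drop b).take (c - b) := by
  have hd : l.drop b = (l.drop a).drop (b - a) := by
    rw [List.drop_drop]; congr 1; omega
  rw [hd, ← List.take_add]
  congr 1; omega

theorem pvGoB_spec (tup : List Int) (n : Nat) (lo hi : Int)
    (hn : (hi - lo).toNat = n) (h0 : 0 ≤ lo) (hle : lo ≤ hi) (hhi : hi ≤ (tup.length : Int)) :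
    pvGoB tup lo hi = pvDecode ((tup.drop lo.toNat).take (hi - lo).toNat) := by
  induction n using Nat.strong_induction_on generalizing lo hi with
  | _ n ih =>
    rw [pvGoB]
    by_cases hbase : lo ≥ hi
    · rw [if_pos hbase]
      have : (hi - lo).toNat = 0 := by omega
      simp [this, pvDecode, String.join]
    · rw [if_neg hbase]
      by_cases hone : hi - lo = 1
      · rw [if_pos hone]
        have hlt : lo.toNat < tup.length := by omega
        rw [PySem.List.pyGet?_eq_some_getElem tup h0 (show lo < (tup.length : Int) by omega)]
        have hseg : (tup.drop lo.toNat).take (hi - lo).toNat = [tup[lo.toNat]] := by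
          have h1 : (hi - lo).toNat = 1 := by omega
          rw [h1, List.drop_eq_getElem_cons hlt, List.take_succ_cons, List.take_zero]
        rw [hseg]
        have hjoin : pvDecode [tup[lo.toNat]] = pvChr tup[lo.toNat] := by
          simp [pvDecode, String.join]
        rw [hjoin]
        show (if 0 ≤ tup[lo.toNat] ∧ tup[lo.toNat] < 36 then
                match PySem.Str.pyGet? pvTable tup[lo.toNat] with
                | some ch => String.mk [ch]
                | none => ""
              else "") = pvChr tup[lo.toNat]
        by_cases hc : 0 ≤ tup[lo.toNat] ∧ tup[lo.toNat] < 36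
        · rw [if_pos hc, table_pyGet? _ hc]
        · rw [if_neg hc, pvChr, if_neg hc]
      · rw [if_neg hone]
        have h2 : lo + 2 ≤ hi := by omega
        have hmid : PySem.Int.floordiv (lo + hi) 2 = (lo + hi) / 2 :=
          PySem.Int.floordiv_eq_ediv_of_pos (by omega)
        have hb1 : lo < PySem.Int.floordiv (lo + hi) 2 := by rw [hmid]; omega
        have hb2 : PySem.Int.floordiv (lo + hi) 2 < hi := by rw [hmid]; omega
        show pvGoB tup lo (PySem.Int.floordiv (lo + hi) 2) ++
             pvGoB tup (PySem.Int.floordiv (lo + hi) 2) hi = _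
        generalize hm : PySem.Int.floordiv (lo + hi) 2 = mid at hb1 hb2
        rw [ih (mid - lo).toNat (by omega) lo mid rfl h0 (by omega) (by omega),
            ih (hi - mid).toNat (by omega) mid hi rfl (by omega) (by omega) hhi,
            ← pvDecode_append]
        congr 1
        have hsplit := take_drop_split tup lo.toNat mid.toNat hi.toNat (by omega) (by omega)
        have e1 : (hi - lo).toNat = hi.toNat - lo.toNat := by omega
        have e2 : (mid - lo).toNat = mid.toNat - lo.toNat := by omega
        have e3 : (hi - mid).toNat = hi.toNat - mid.toNat := by omega
        rw [e1, e2, e3, hsplit]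

-- ===== VERDICT =====
theorem RSA_Decode_spec : Claim_equal_RSA_Decode := by
  intro tup _
  show RSA_Decode tup = RSA_Decode_alt tup
  unfold RSA_Decode RSA_Decode_alt
  rw [pvLoopA_spec, pvGoB_spec tup (tup.length : Int).toNat 0 tup.length (by omega) (by omega)
        (by omega) (by omega)]
  simp
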